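-- pv_equiv track=rewrite | github.com/aws/amazon-sagemaker-examples | sagemaker-python-sdk/chainer_sentiment_analysis/src/nlp_utils.py | make_vocab
-- ===== SOURCE A (Python) =====
-- import collections
--
-- def make_vocab(dataset, max_vocab_size=20000, min_freq=2):
--     counts = collections.defaultdict(int)
--     for tokens, _ in dataset:
--         for token in tokens:
--             counts[token] += 1
--
--     vocab = {"<eos>": 0, "<unk>": 1}
--     for w, c in sorted(counts.items(), key=lambda x: (-x[1], x[0])):
--         if len(vocab) >= max_vocab_size or c < min_freq:
--             break
--         vocab[w] = len(vocab)
--     return vocab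
-- ===== SOURCE B (Python) =====
-- import collections
--
-- def make_vocab(dataset, max_vocab_size=20000, min_freq=2):
--     counts = collections.defaultdict(int)
--     for tokens, _ in dataset:
--         for token in tokens:
--             counts[token] += 1
--     # bucket sort: group the frequent words by their exact count, then walk the
--     # counts downwards; only the distinct counts and each (small) bucket get sorted
--     buckets = collections.defaultdict(list)
--     for w, c in counts.items():
--         if c >= min_freq:
--             buckets[c].append(w)
--     vocab = {"<eos>": 0, "<unk>": 1}
--     room = max_vocab_size - 2
--     for c in sorted(buckets, reverse=True):
--         if room <= 0:
--             break
--         ws = sorted(buckets[c])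
--         for w in ws[:room]:
--             vocab[w] = len(vocab)
--         room -= len(ws)
--     return vocab
-- ===== Notes on version B (the rewrite author's own statement) =====
-- stated objective: faster
-- what changed: B replaces A's comparison sort of all (word,count) pairs under the tuple key (-count, word) plus a break-loop with a bucket (counting-sort) grouping: frequent words are grouped into buckets keyed by their exact count, the distinct counts are walked in decreasing order, each bucket is sorted lexicographically on its own, and a remaining-room counter with a slice replaces the per-word size check.
import Mathlib
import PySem

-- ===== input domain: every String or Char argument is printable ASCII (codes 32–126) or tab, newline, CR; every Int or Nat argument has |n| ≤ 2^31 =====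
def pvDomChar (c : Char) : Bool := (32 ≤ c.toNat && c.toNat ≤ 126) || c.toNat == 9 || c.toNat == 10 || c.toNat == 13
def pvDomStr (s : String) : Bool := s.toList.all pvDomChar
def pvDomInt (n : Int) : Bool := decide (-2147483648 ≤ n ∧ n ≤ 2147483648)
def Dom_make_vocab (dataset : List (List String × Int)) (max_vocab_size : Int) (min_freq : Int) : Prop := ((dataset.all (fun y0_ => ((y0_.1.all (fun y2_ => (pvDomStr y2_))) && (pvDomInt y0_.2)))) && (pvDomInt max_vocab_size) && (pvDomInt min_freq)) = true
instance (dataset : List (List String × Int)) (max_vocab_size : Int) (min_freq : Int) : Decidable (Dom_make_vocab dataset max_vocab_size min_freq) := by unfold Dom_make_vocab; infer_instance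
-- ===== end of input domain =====

-- B groups the frequent words into buckets keyed by their exact count (a counting-sort) and walks
-- the distinct counts downwards with a remaining-room counter, instead of A's comparison sort of
-- (word, count) pairs with a break-loop reading the growing dict's size (objective: alternative).


-- ===== PORT A =====
-- the 'for w, c in sorted(...)' loop with its break, carrying the mutable dict 'vocab'
def makeVocabLoop (max_vocab_size min_freq : Int) :
    List (String × Int) → PySem.Dict String Int → PySem.Dict String Int
  | [], vocab => vocab
  | (w, c) :: rest, vocab =>
    if max_vocab_size ≤ (vocab.size : Int) ∨ c < min_freq then vocab
    else makeVocabLoop max_vocab_size min_freq rest (vocab.insert w (vocab.size : Int))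

def make_vocab (dataset : List (List String × Int)) (max_vocab_size : Int) (min_freq : Int) : List (String × Int) :=
  let counts := dataset.foldl (fun d p => p.1.foldl (fun d t => d.modify t 0 (· + 1)) d) PySem.Dict.empty
  (makeVocabLoop max_vocab_size min_freq
      (PySem.List.sorted2 counts.items (fun x => -x.2) (fun x => x.1))
      ((PySem.Dict.empty.insert "<eos>" 0).insert "<unk>" 1)).items

-- ===== PORT B =====
-- 'for c in sorted(buckets, reverse=True): …' with the room counter; 'ws' (= sorted(buckets[c]))
-- is written out at each of its three uses; 'ws[:room]' with room > 0 is 'take room.toNat'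
def bucketLoop (b : PySem.Dict Int (List String)) :
    List Int → Int → PySem.Dict String Int → PySem.Dict String Int
  | [], _, vocab => vocab
  | c :: rest, room, vocab =>
    if room ≤ 0 then vocab
    else
      bucketLoop b rest (room - ((PySem.List.sorted (b.getD c []) (fun x => x) false).length : Int))
        (((PySem.List.sorted (b.getD c []) (fun x => x) false).take room.toNat).foldl
          (fun v w => v.insert w (v.size : Int)) vocab)

def make_vocab_alt (dataset : List (List String × Int)) (max_vocab_size : Int) (min_freq : Int) : List (String × Int) :=
  let counts := dataset.foldl (fun d p => p.1.foldl (fun d t => d.modify t 0 (· + 1)) d) PySem.Dict.empty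
  let buckets := counts.items.foldl
      (fun b p => if min_freq ≤ p.2 then b.modify p.2 [] (· ++ [p.1]) else b)
      (PySem.Dict.empty : PySem.Dict Int (List String))
  (bucketLoop buckets (PySem.List.sorted buckets.keys (fun x => x) true) (max_vocab_size - 2)
      ((PySem.Dict.empty.insert "<eos>" 0).insert "<unk>" 1)).items

-- ===== PRECONDITION & SPEC =====
-- Pre_ excludes inputs where a reserved token "<eos>"/"<unk>" occurs with frequency ≥ min_freq while
-- max_vocab_size > 2: only there can the reserved word reach the insertion step, where A's dict
-- overwrite (len stalls) and B's running room counter give vocabularies that are both accidental.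
def Pre_make_vocab (dataset : List (List String × Int)) (max_vocab_size : Int) (min_freq : Int) : Prop :=
  max_vocab_size ≤ 2 ∨
    (((dataset.flatMap (fun p => p.1)).count "<eos>" : Int) < min_freq ∧
     ((dataset.flatMap (fun p => p.1)).count "<unk>" : Int) < min_freq)
instance (dataset : List (List String × Int)) (max_vocab_size : Int) (min_freq : Int) : Decidable (Pre_make_vocab dataset max_vocab_size min_freq) := by unfold Pre_make_vocab; infer_instance
def pvWitness_make_vocab : (List (List String × Int)) × Int × Int := ([(["a", "b", "a"], 1)], 5, 1)

def Spec_make_vocab (dataset : List (List String × Int)) (max_vocab_size : Int) (min_freq : Int) (out : List (String × Int)) : Prop := out = make_vocab_alt dataset max_vocab_size min_freq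
instance (dataset : List (List String × Int)) (max_vocab_size : Int) (min_freq : Int) (out : List (String × Int)) : Decidable (Spec_make_vocab dataset max_vocab_size min_freq out) := by unfold Spec_make_vocab; infer_instance

-- ===== CLAIM (what is proved, stated in full; the proofs are below) =====
def Claim_equal_make_vocab : Prop := ∀ (dataset : List (List String × Int)) (max_vocab_size : Int) (min_freq : Int), Dom_make_vocab dataset max_vocab_size min_freq → Pre_make_vocab dataset max_vocab_size min_freq → Spec_make_vocab dataset max_vocab_size min_freq (make_vocab dataset max_vocab_size min_freq)

-- ===== LEMMAS AND PROOFS =====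

theorem pvWitness_ok :
    Dom_make_vocab pvWitness_make_vocab.1 pvWitness_make_vocab.2.1 pvWitness_make_vocab.2.2 ∧
    Pre_make_vocab pvWitness_make_vocab.1 pvWitness_make_vocab.2.1 pvWitness_make_vocab.2.2 := by
  decide

-- sorted2 with keys (-count, word) is sorted with the lexicographic pair key
theorem sorted2_eq_sorted_lex (xs : List (String × Int)) :
    PySem.List.sorted2 xs (fun x => -x.2) (fun x => x.1) false
      = PySem.List.sorted xs (fun x => toLex (-x.2, x.1)) false := by
  have hcmp : (fun (a b : String × Int) => decide (-a.2 < -b.2) || (!decide (-b.2 < -a.2) && decide (a.1 < b.1)))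
      = (fun (a b : String × Int) => decide (toLex (-a.2, a.1) < toLex (-b.2, b.1))) := by
    funext a b
    by_cases h1 : -a.2 < -b.2 <;> by_cases h2 : -b.2 < -a.2 <;> by_cases h3 : a.1 < b.1 <;>
      simp [h1, h2, h3, Prod.Lex.toLex_lt_toLex] <;> omega
  rw [PySem.List.sorted_eq_foldl_insertBy]
  show List.foldl (fun acc x => PySem.List.insertBy
      (fun (a b : String × Int) => decide (-a.2 < -b.2) || (!decide (-b.2 < -a.2) && decide (a.1 < b.1))) x acc) [] xs = _
  rw [hcmp]

-- counts in the sorted list are non-increasing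
theorem sorted2_counts_desc (xs : List (String × Int)) :
    (PySem.List.sorted2 xs (fun x => -x.2) (fun x => x.1) false).Pairwise
      (fun a b => b.2 ≤ a.2) := by
  rw [sorted2_eq_sorted_lex]
  refine (PySem.List.sorted_pairwise xs (fun x => toLex (-x.2, x.1))).imp ?_
  intro a b h
  rcases Prod.Lex.toLex_le_toLex.mp h with h' | ⟨h', _⟩ <;> omega

-- on a count-non-increasing list, filtering by min_freq is a prefix
theorem filter_eq_takeWhile (m : Int) (l : List (String × Int))
    (h : l.Pairwise (fun a b => b.2 ≤ a.2)) :
    l.filter (fun p => decide (m ≤ p.2)) = l.takeWhile (fun p => decide (m ≤ p.2)) := by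
  induction l with
  | nil => rfl
  | cons a t ih =>
    rcases List.pairwise_cons.mp h with ⟨ha, ht⟩
    by_cases hm : m ≤ a.2
    · simp [List.filter_cons, List.takeWhile_cons, hm, ih ht]
    · simp only [List.filter_cons, List.takeWhile_cons, decide_eq_true_eq, hm, if_neg,
        decide_false]
      simp only [Bool.false_eq_true, if_false]
      apply List.filter_eq_nil_iff.mpr
      intro p hp
      have := ha p hp
      simp only [decide_eq_true_eq]
      omega

-- A's break-loop, on fresh distinct keys, appends exactly the enumerated capped frequent prefix
theorem makeVocabLoop_items (cap m : Int) (l : List (String × Int)) :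
    ∀ (v : PySem.Dict String Int), v.keys.Nodup →
      (∀ p ∈ l, m ≤ p.2 → v.contains p.1 = false) → (l.map (fun p => p.1)).Nodup →
      (makeVocabLoop cap m l v).items
        = v.items ++
          (PySem.List.enumerate
              (((l.takeWhile (fun p => decide (m ≤ p.2))).take ((cap - (v.size : Int)).toNat)).map (fun p => p.1))
              (v.size : Int)).map (fun a => (a.2, a.1)) := by
  induction l with
  | nil =>
    intro v _ _ _
    simp [makeVocabLoop, PySem.List.enumerate]
  | cons hd rest ih =>
    rcases hd with ⟨w, c⟩
    intro v hnd hfresh hkeys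
    by_cases hstop : cap ≤ (v.size : Int) ∨ c < m
    · have hloop : makeVocabLoop cap m ((w, c) :: rest) v = v := by
        simp [makeVocabLoop, hstop]
      rcases hstop with hcap | hc
      · have hz : (cap - (v.size : Int)).toNat = 0 := by omega
        simp [hloop, hz, PySem.List.enumerate]
      · have hw : (decide (m ≤ c)) = false := by simp; omega
        simp [hloop, List.takeWhile_cons, hw, PySem.List.enumerate]
    · push_neg at hstop
      obtain ⟨hcap, hc⟩ := hstop
      have hwfresh : v.contains w = false := hfresh (w, c) (by simp) hc
      have hloop : makeVocabLoop cap m ((w, c) :: rest) v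
          = makeVocabLoop cap m rest (v.insert w (v.size : Int)) := by
        have hnot : ¬(cap ≤ (v.size : Int) ∨ c < m) := by omega
        simp [makeVocabLoop, hnot]
      have hsize : (v.insert w (v.size : Int)).size = v.size + 1 := by
        rw [PySem.Dict.size_insert]; simp [hwfresh]
      have hitems : (v.insert w (v.size : Int)).items = v.items ++ [(w, (v.size : Int))] :=
        PySem.Dict.items_insert_of_not_contains v ((v.size : Nat) : Int) hwfresh
      have hnd' : (v.insert w (v.size : Int)).keys.Nodup :=
        PySem.Dict.nodup_keys_insert v w _ hnd
      have hkrest : (rest.map (fun p => p.1)).Nodup := (List.nodup_cons.mp hkeys).2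
      have hwrest : ∀ p ∈ rest, p.1 ≠ w := by
        intro p hp hew
        exact (List.nodup_cons.mp hkeys).1 (List.mem_map.mpr ⟨p, hp, hew⟩)
      have hfresh' : ∀ p ∈ rest, m ≤ p.2 → (v.insert w (v.size : Int)).contains p.1 = false := by
        intro p hp hpm
        rw [PySem.Dict.contains_insert]
        simp [hwrest p hp, hfresh p (List.mem_cons_of_mem _ hp) hpm]
      have := ih (v.insert w (v.size : Int)) hnd' hfresh' hkrest
      rw [hloop, this, hitems, hsize]
      have hm : (decide (m ≤ c)) = true := by simp; omega
      have htn : (cap - (v.size : Int)).toNat = (cap - ((v.size : Nat) + 1 : Nat)).toNat + 1 := by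
        push_cast; omega
      rw [List.takeWhile_cons, hm]
      simp only [if_true]
      rw [htn, List.take_succ_cons, List.map_cons]
      rw [PySem.List.enumerate_cons]
      push_cast
      simp [List.append_assoc]

-- when the cap is already reached, the break fires on the first iteration
theorem makeVocabLoop_stop (cap m : Int) (l : List (String × Int)) (v : PySem.Dict String Int)
    (h : cap ≤ (v.size : Int)) : makeVocabLoop cap m l v = v := by
  cases l with
  | nil => rfl
  | cons hd rest => rcases hd with ⟨w, c⟩; simp [makeVocabLoop, Or.inl h]

-- the seed dict {"<eos>": 0, "<unk>": 1}
theorem seed_contains_eq_false (w : String) (h1 : w ≠ "<eos>") (h2 : w ≠ "<unk>") :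
    ((PySem.Dict.empty.insert "<eos>" (0 : Int)).insert "<unk>" 1).contains w = false := by
  rw [PySem.Dict.contains_insert, PySem.Dict.contains_insert]
  simp [h1, h2, PySem.Dict.contains_empty]

-- B's inner 'vocab[w] = len(vocab)' loop over fresh distinct words: items, size, keys, contains
theorem foldl_insert_size_facts (ws : List String) :
    ∀ (v : PySem.Dict String Int), v.keys.Nodup → ws.Nodup →
      (∀ w ∈ ws, v.contains w = false) →
      (ws.foldl (fun v w => v.insert w (v.size : Int)) v).items
          = v.items ++ (PySem.List.enumerate ws (v.size : Int)).map (fun a => (a.2, a.1)) ∧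
      (ws.foldl (fun v w => v.insert w (v.size : Int)) v).size = v.size + ws.length ∧
      (ws.foldl (fun v w => v.insert w (v.size : Int)) v).keys.Nodup ∧
      ∀ x, x ∉ ws → (ws.foldl (fun v w => v.insert w (v.size : Int)) v).contains x = v.contains x := by
  induction ws with
  | nil => intro v hnd _ _; exact ⟨by simp [PySem.List.enumerate], by simp, hnd, fun _ _ => rfl⟩
  | cons w rest ih =>
    intro v hnd hwnd hfresh
    have hwf : v.contains w = false := hfresh w (by simp)
    have hitems : (v.insert w (v.size : Int)).items = v.items ++ [(w, (v.size : Int))] :=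
      PySem.Dict.items_insert_of_not_contains v ((v.size : Nat) : Int) hwf
    have hsize : (v.insert w (v.size : Int)).size = v.size + 1 := by
      rw [PySem.Dict.size_insert]; simp [hwf]
    have hnd' : (v.insert w (v.size : Int)).keys.Nodup :=
      PySem.Dict.nodup_keys_insert v w _ hnd
    obtain ⟨hw, hrest⟩ := List.nodup_cons.mp hwnd
    have hfresh' : ∀ u ∈ rest, (v.insert w (v.size : Int)).contains u = false := by
      intro u hu
      rw [PySem.Dict.contains_insert]
      have hne : u ≠ w := fun e => hw (e ▸ hu)
      simp [hne, hfresh u (List.mem_cons_of_mem _ hu)]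
    obtain ⟨h1, h2, h3, h4⟩ := ih (v.insert w (v.size : Int)) hnd' hrest hfresh'
    refine ⟨?_, ?_, ?_, ?_⟩
    · simp only [List.foldl_cons]
      rw [h1, hitems, hsize, PySem.List.enumerate_cons]
      push_cast
      simp [List.append_assoc]
    · simp only [List.foldl_cons]
      rw [h2, hsize, List.length_cons]
      omega
    · simpa using h3
    · intro x hx
      simp only [List.foldl_cons]
      rw [h4 x (fun h => hx (List.mem_cons_of_mem _ h)), PySem.Dict.contains_insert]
      have hne : x ≠ w := fun e => hx (by simp [e])
      simp [hne]

-- with no room left, the bucket walk breaks at once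
theorem bucketLoop_stop (b : PySem.Dict Int (List String)) (cs : List Int) (room : Int)
    (v : PySem.Dict String Int) (h : room ≤ 0) : bucketLoop b cs room v = v := by
  cases cs with
  | nil => rfl
  | cons c rest => simp [bucketLoop, h]

-- B's bucket walk, on fresh distinct words, appends the enumerated room-capped flattened buckets
theorem bucketLoop_items (b : PySem.Dict Int (List String)) (cs : List Int) :
    ∀ (room : Int) (v : PySem.Dict String Int), v.keys.Nodup →
      (cs.flatMap (fun c => PySem.List.sorted (b.getD c []) (fun x => x) false)).Nodup →
      (∀ w ∈ cs.flatMap (fun c => PySem.List.sorted (b.getD c []) (fun x => x) false),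
        v.contains w = false) →
      (bucketLoop b cs room v).items
        = v.items ++ (PySem.List.enumerate
            ((cs.flatMap (fun c => PySem.List.sorted (b.getD c []) (fun x => x) false)).take room.toNat)
            (v.size : Int)).map (fun a => (a.2, a.1)) := by
  induction cs with
  | nil => intro room v _ _ _; simp [bucketLoop, PySem.List.enumerate]
  | cons c rest ih =>
    intro room v hnd hfnd hfresh
    rw [List.flatMap_cons] at hfnd hfresh ⊢
    set ws := PySem.List.sorted (b.getD c []) (fun x => x) false with hws
    set R := rest.flatMap (fun c => PySem.List.sorted (b.getD c []) (fun x => x) false) with hR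
    by_cases hr : room ≤ 0
    · rw [bucketLoop_stop b _ room v hr]
      have hz : room.toNat = 0 := by omega
      simp [hz, PySem.List.enumerate]
    · have hstep : bucketLoop b (c :: rest) room v
          = bucketLoop b rest (room - (ws.length : Int))
              ((ws.take room.toNat).foldl (fun v w => v.insert w (v.size : Int)) v) := by
        simp [bucketLoop, hr, ← hws]
      have hwnd : ws.Nodup := (List.nodup_append.mp hfnd).1
      have hRnd : R.Nodup := (List.nodup_append.mp hfnd).2.1
      have hdisj : ws.Disjoint R := List.disjoint_of_nodup_append hfnd
      by_cases hlen : ws.length ≤ room.toNat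
      · have htake : ws.take room.toNat = ws := List.take_of_length_le hlen
        obtain ⟨h1, h2, h3, h4⟩ := foldl_insert_size_facts ws v hnd hwnd
          (fun w hw => hfresh w (List.mem_append_left _ hw))
        have hfreshR : ∀ w ∈ R,
            (ws.foldl (fun v w => v.insert w (v.size : Int)) v).contains w = false := by
          intro w hw
          rw [h4 w (fun hmem => hdisj hmem hw)]
          exact hfresh w (List.mem_append_right _ hw)
        have hih := ih (room - (ws.length : Int))
          (ws.foldl (fun v w => v.insert w (v.size : Int)) v) h3 hRnd hfreshR
        rw [hstep, htake, hih, h1, h2]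
        have htn : (room - (ws.length : Int)).toNat = room.toNat - ws.length := by omega
        rw [htn, List.take_append, List.take_of_length_le hlen,
          PySem.List.enumerate_append]
        push_cast
        simp [List.append_assoc]
      · have hlt : room.toNat ≤ ws.length := by omega
        have hpnd : (ws.take room.toNat).Nodup := hwnd.sublist (List.take_sublist _ _)
        have hpfresh : ∀ w ∈ ws.take room.toNat, v.contains w = false := by
          intro w hw
          exact hfresh w (List.mem_append_left _ ((List.take_sublist _ _).mem hw))
        obtain ⟨h1, _, _, _⟩ := foldl_insert_size_facts (ws.take room.toNat) v hnd hpnd hpfresh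
        have hstop2 : room - (ws.length : Int) ≤ 0 := by omega
        rw [hstep, bucketLoop_stop b rest _ _ hstop2, h1,
          List.take_append_of_le_length hlt]

-- the bucket-building fold, seen over the swapped pairs (to cite the library grouping lemmas)
theorem bucket_fold_swap (xs : List (String × Int)) (d : PySem.Dict Int (List String)) :
    xs.foldl (fun b p => b.modify p.2 [] (· ++ [p.1])) d
      = (xs.map Prod.swap).foldl (fun d p => d.modify p.1 [] (· ++ [p.2])) d := by
  rw [List.foldl_map]; rfl

theorem bucket_getD (xs : List (String × Int)) (c : Int) :
    (xs.foldl (fun b p => b.modify p.2 [] (· ++ [p.1]))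
        (PySem.Dict.empty : PySem.Dict Int (List String))).getD c []
      = (xs.filter (fun p => p.2 == c)).map (·.1) := by
  rw [bucket_fold_swap, PySem.Dict.getD_foldl_modify_append]
  simp [List.filter_map]
  rfl

theorem bucket_keys (xs : List (String × Int)) :
    (xs.foldl (fun b p => b.modify p.2 [] (· ++ [p.1]))
        (PySem.Dict.empty : PySem.Dict Int (List String))).keys
      = PySem.Set.ofList (xs.map (·.2)) := by
  rw [bucket_fold_swap, PySem.Dict.keys_foldl_modify_key]
  simp [PySem.Dict.keys_empty, PySem.Set.update_nil_left, Function.comp_def]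

-- flattening per-count filters over the distinct covering counts is a permutation
theorem flatMap_filter_perm (cs : List Int) :
    ∀ (F : List (String × Int)), cs.Nodup → (∀ p ∈ F, p.2 ∈ cs) →
      (cs.flatMap (fun c => F.filter (fun p => p.2 == c))).Perm F := by
  induction cs with
  | nil =>
    intro F _ hcov
    have hF : F = [] := by
      cases F with
      | nil => rfl
      | cons p t => exact absurd (hcov p (by simp)) (by simp)
    simp [hF]
  | cons c rest ih =>
    intro F hnd hcov
    obtain ⟨hcr, hrnd⟩ := List.nodup_cons.mp hnd
    rw [List.flatMap_cons]
    have hrw : ∀ c' ∈ rest, F.filter (fun p => p.2 == c')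
        = (F.filter (fun p => !(p.2 == c))).filter (fun p => p.2 == c') := by
      intro c' hc'
      have hne : c' ≠ c := fun e => hcr (e ▸ hc')
      rw [List.filter_filter]
      apply List.filter_congr
      intro p _
      by_cases hp : p.2 = c' <;> simp [hp, hne]
    have hfl : rest.flatMap (fun c' => F.filter (fun p => p.2 == c'))
        = rest.flatMap (fun c' => (F.filter (fun p => !(p.2 == c))).filter (fun p => p.2 == c')) :=
      List.flatMap_congr hrw
    have hcov' : ∀ p ∈ F.filter (fun p => !(p.2 == c)), p.2 ∈ rest := by
      intro p hp
      obtain ⟨hpF, hpc⟩ := List.mem_filter.mp hp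
      have hmem := hcov p hpF
      simp only [Bool.not_eq_eq_eq_not, Bool.not_true, beq_eq_false_iff_ne, ne_eq] at hpc
      rcases List.mem_cons.mp hmem with h | h
      · exact absurd h hpc
      · exact h
    have hperm := ih (F.filter (fun p => !(p.2 == c))) hrnd hcov'
    rw [hfl]
    exact (hperm.append_left _).trans (List.filter_append_perm _ F)

-- the flattened buckets, paired back with their count, are strictly increasing under (-count, word)
theorem pairwise_key_flatMap (cs : List Int) (bw : Int → List String)
    (hcs : cs.Pairwise (fun a b => b < a))
    (hin : ∀ c ∈ cs, (bw c).Pairwise (· < ·)) :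
    (cs.flatMap (fun c => (bw c).map (fun w => (w, c)))).Pairwise
      (fun p q => toLex (-p.2, p.1) < toLex (-q.2, q.1)) := by
  induction cs with
  | nil => simp
  | cons c rest ih =>
    rw [List.flatMap_cons, List.pairwise_append]
    obtain ⟨hhd, htl⟩ := List.pairwise_cons.mp hcs
    refine ⟨?_, ih htl (fun c' hc' => hin c' (List.mem_cons_of_mem _ hc')), ?_⟩
    · rw [List.pairwise_map]
      refine (hin c (by simp)).imp ?_
      intro a b hab
      exact Prod.Lex.toLex_lt_toLex.mpr (Or.inr ⟨rfl, hab⟩)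
    · intro x hx y hy
      rcases List.mem_map.mp hx with ⟨w, _, rfl⟩
      rcases List.mem_flatMap.mp hy with ⟨c', hc', hy'⟩
      rcases List.mem_map.mp hy' with ⟨w', _, rfl⟩
      have hlt := hhd c' hc'
      exact Prod.Lex.toLex_lt_toLex.mpr (Or.inl (by simp; omega))

-- with pairwise-distinct words, the lexicographic sort is strictly increasing in its key
theorem sorted_lex_pairwise_lt (xs : List (String × Int)) (h : (xs.map (·.1)).Nodup) :
    (PySem.List.sorted xs (fun p => toLex (-p.2, p.1)) false).Pairwise
      (fun p q => toLex (-p.2, p.1) < toLex (-q.2, q.1)) := by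
  have hle := PySem.List.sorted_pairwise xs (fun p => toLex (-p.2, p.1))
  have hnd : ((PySem.List.sorted xs (fun p => toLex (-p.2, p.1)) false).map (·.1)).Nodup :=
    ((PySem.List.sorted_perm xs _ false).map _).nodup_iff.mpr h
  have hne : (PySem.List.sorted xs (fun p => toLex (-p.2, p.1)) false).Pairwise
      (fun a b => a.1 ≠ b.1) := List.pairwise_map.mp hnd
  refine (hle.and hne).imp ?_
  rintro a b ⟨h1, h2⟩
  refine lt_of_le_of_ne h1 ?_
  intro he
  exact h2 (congrArg (fun x => (ofLex x).2) he)

-- with pairwise-distinct words, filtering commutes with the lexicographic sort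
theorem filter_sorted_lex (xs : List (String × Int)) (p : (String × Int) → Bool)
    (h : (xs.map (·.1)).Nodup) :
    PySem.List.sorted (xs.filter p) (fun q => toLex (-q.2, q.1)) false
      = (PySem.List.sorted xs (fun q => toLex (-q.2, q.1)) false).filter p := by
  apply PySem.List.sorted_eq_of_perm_of_pairwise_lt
  · exact (PySem.List.sorted_perm xs _ false).filter p
  · exact (sorted_lex_pairwise_lt xs h).filter p

-- ===== VERDICT (by name: the statement is the Claim_ definition above) =====
theorem make_vocab_spec : Claim_equal_make_vocab := by
  intro dataset cap mf _ hpre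
  unfold Spec_make_vocab make_vocab make_vocab_alt
  set flat := dataset.flatMap (fun p => p.1) with hflat
  have hcounts : dataset.foldl (fun d p => p.1.foldl (fun d t => d.modify t 0 (· + 1)) d) PySem.Dict.empty
      = PySem.Dict.counter flat := by
    rw [PySem.Dict.counter_eq_foldl, List.foldl_flatMap]
  rw [hcounts]
  set items := (PySem.Dict.counter flat).items with hitems
  set ordered := PySem.List.sorted2 items (fun x => -x.2) (fun x => x.1) with hord
  set seed := ((PySem.Dict.empty.insert "<eos>" (0 : Int)).insert "<unk>" 1) with hseed
  show (makeVocabLoop cap mf ordered seed).items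
      = (bucketLoop
          (items.foldl (fun b p => if mf ≤ p.2 then b.modify p.2 [] (· ++ [p.1]) else b)
            PySem.Dict.empty)
          (PySem.List.sorted
            (items.foldl (fun b p => if mf ≤ p.2 then b.modify p.2 [] (· ++ [p.1]) else b)
              PySem.Dict.empty).keys (fun x => x) true)
          (cap - 2) seed).items
  have hbif : items.foldl (fun b p => if mf ≤ p.2 then b.modify p.2 [] (· ++ [p.1]) else b)
        (PySem.Dict.empty : PySem.Dict Int (List String))
      = (items.filter (fun p => decide (mf ≤ p.2))).foldl
          (fun b p => b.modify p.2 [] (· ++ [p.1])) PySem.Dict.empty := by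
    rw [PySem.List.foldl_ite_eq_foldl_filter]
  rw [hbif]
  set F := items.filter (fun p => decide (mf ≤ p.2)) with hF
  set Bk := F.foldl (fun b p => b.modify p.2 [] (· ++ [p.1]))
      (PySem.Dict.empty : PySem.Dict Int (List String)) with hBk
  set cs := PySem.List.sorted Bk.keys (fun x => x) true with hcs
  have hseedsize : ((seed.size : Nat) : Int) = 2 := by decide
  have hseednd : seed.keys.Nodup := by decide
  by_cases hcap2 : cap ≤ 2
  · -- the cap is at most the two seeded entries: A breaks at once, B has no room
    rw [makeVocabLoop_stop cap mf ordered seed (by omega),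
      bucketLoop_stop Bk cs (cap - 2) seed (by omega)]
  · -- the cap leaves room: no reserved token has frequency ≥ min_freq
    have hres : ((flat.count "<eos>" : Nat) : Int) < mf ∧ ((flat.count "<unk>" : Nat) : Int) < mf := by
      rcases hpre with h | h
      · omega
      · exact h
    -- every word of 'ordered' that passes the frequency test is not a reserved word
    have hfreq : ∀ p ∈ ordered, mf ≤ p.2 → p.1 ≠ "<eos>" ∧ p.1 ≠ "<unk>" := by
      intro p hp hpm
      have hp' : p ∈ items := (PySem.List.sorted2_perm items _ _ false).mem_iff.mp hp
      rw [hitems, PySem.Dict.items_counter] at hp'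
      rcases List.mem_map.mp hp' with ⟨k, _, hkp⟩
      constructor
      · intro he
        have h1 : k = "<eos>" := by rw [← hkp] at he; exact he
        have h2 : p.2 = ((flat.count "<eos>" : Nat) : Int) := by rw [← hkp, h1]
        omega
      · intro he
        have h1 : k = "<unk>" := by rw [← hkp] at he; exact he
        have h2 : p.2 = ((flat.count "<unk>" : Nat) : Int) := by rw [← hkp, h1]
        omega
    -- distinct words
    have hitemsnd : (items.map (fun p => p.1)).Nodup := by
      have := PySem.Dict.nodup_keys_counter flat
      simpa [PySem.Dict.keys, hitems] using this
    have hkeysnd : (ordered.map (fun p => p.1)).Nodup := by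
      have hperm : (ordered.map (fun p => p.1)).Perm (items.map (fun p => p.1)) :=
        (PySem.List.sorted2_perm items _ _ false).map _
      exact hperm.nodup_iff.mpr hitemsnd
    have hFnd : (F.map (fun p => p.1)).Nodup :=
      hitemsnd.sublist ((List.filter_sublist.map _))
    -- bucket contents and keys
    have hgetD : ∀ c : Int, Bk.getD c [] = (F.filter (fun p => p.2 == c)).map (·.1) := by
      intro c; rw [hBk]; exact bucket_getD F c
    have hkeys : Bk.keys = PySem.Set.ofList (F.map (·.2)) := by
      rw [hBk]; exact bucket_keys F
    -- the distinct counts, descending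
    have hcsnd : cs.Nodup := by
      refine ((PySem.List.sorted_perm Bk.keys _ true).nodup_iff).mpr ?_
      rw [hkeys]; exact PySem.Set.nodup_ofList _
    have hcsdesc : cs.Pairwise (fun a b => b < a) := by
      have h1 := PySem.List.sorted_pairwise_rev Bk.keys (fun x => x)
      have h2 : cs.Pairwise (fun a b => a ≠ b) := hcsnd
      exact ((h1.and h2).imp (fun h => lt_of_le_of_ne h.1 (Ne.symm h.2)))
    have hcov : ∀ p ∈ F, p.2 ∈ cs := by
      intro p hp
      rw [hcs, PySem.List.mem_sorted, hkeys, PySem.Set.mem_ofList]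
      exact List.mem_map_of_mem hp
    -- each bucket, sorted, is strictly increasing
    have hbnd : ∀ c : Int, (Bk.getD c []).Nodup := by
      intro c
      rw [hgetD c]
      exact hFnd.sublist ((List.filter_sublist.map _))
    have hbwnd : ∀ c : Int, (PySem.List.sorted (Bk.getD c []) (fun x => x) false).Nodup :=
      fun c => ((PySem.List.sorted_perm _ _ false).nodup_iff).mpr (hbnd c)
    have hbwlt : ∀ c ∈ cs, (PySem.List.sorted (Bk.getD c []) (fun x => x) false).Pairwise (· < ·) := by
      intro c hc
      have h1 := PySem.List.sorted_pairwise (Bk.getD c []) (fun x => x)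
      have h2 : (PySem.List.sorted (Bk.getD c []) (fun x => x) false).Pairwise (fun a b => a ≠ b) :=
        hbwnd c
      exact (h1.and h2).imp (fun h => lt_of_le_of_ne h.1 h.2)
    -- a bucket paired back with its count is the per-count filter
    have hchunk : ∀ c : Int, (Bk.getD c []).map (fun w => (w, c)) = F.filter (fun p => p.2 == c) := by
      intro c
      rw [hgetD c, List.map_map]
      have hpt : ∀ p ∈ F.filter (fun p => p.2 == c), ((fun w => (w, c)) ∘ (·.1)) p = id p := by
        intro p hp
        have h2 := (List.mem_filter.mp hp).2
        simp only [beq_iff_eq] at h2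
        simp [Function.comp, ← h2]
      rw [List.map_eq_map_iff.mpr hpt, List.map_id]
    -- the flattened buckets are exactly the frequent part of the sorted list
    set L := cs.flatMap
        (fun c => (PySem.List.sorted (Bk.getD c []) (fun x => x) false).map (fun w => (w, c)))
      with hL
    have hLperm : L.Perm F := by
      refine (List.Perm.flatMap_left cs ?_).trans (flatMap_filter_perm cs F hcsnd hcov)
      intro c _
      exact ((PySem.List.sorted_perm (Bk.getD c []) _ false).map _).trans
        (by rw [hchunk c])
    have hLpw : L.Pairwise (fun p q => toLex (-p.2, p.1) < toLex (-q.2, q.1)) :=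
      pairwise_key_flatMap cs _ hcsdesc hbwlt
    have hLsorted : PySem.List.sorted F (fun q => toLex (-q.2, q.1)) false = L :=
      PySem.List.sorted_eq_of_perm_of_pairwise_lt F L _ hLperm hLpw
    have hLfilter : ordered.filter (fun p => decide (mf ≤ p.2)) = L := by
      rw [hord, sorted2_eq_sorted_lex, ← filter_sorted_lex items _ hitemsnd, ← hF]
      exact hLsorted
    have hflatten : cs.flatMap (fun c => PySem.List.sorted (Bk.getD c []) (fun x => x) false)
        = (ordered.filter (fun p => decide (mf ≤ p.2))).map (fun p => p.1) := by
      rw [hLfilter, hL, List.map_flatMap]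
      apply List.flatMap_congr
      intro c _
      rw [List.map_map]
      exact (List.map_id'' (congrFun rfl) _).symm
    -- A's side
    have hseedfresh : ∀ p ∈ ordered, mf ≤ p.2 → seed.contains p.1 = false := by
      intro p hp hpm
      exact seed_contains_eq_false p.1 (hfreq p hp hpm).1 (hfreq p hp hpm).2
    have hA := makeVocabLoop_items cap mf ordered seed hseednd hseedfresh hkeysnd
    -- B's side
    have hWnd : (cs.flatMap (fun c => PySem.List.sorted (Bk.getD c []) (fun x => x) false)).Nodup := by
      rw [hflatten]
      exact hkeysnd.sublist ((List.filter_sublist.map _))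
    have hWfresh : ∀ w ∈ cs.flatMap (fun c => PySem.List.sorted (Bk.getD c []) (fun x => x) false),
        seed.contains w = false := by
      intro w hw
      rw [hflatten] at hw
      rcases List.mem_map.mp hw with ⟨p, hp, hpw⟩
      rcases List.mem_filter.mp hp with ⟨hpo, hpm⟩
      have hpm' : mf ≤ p.2 := by simpa using hpm
      exact hpw ▸ seed_contains_eq_false p.1 (hfreq p hpo hpm').1 (hfreq p hpo hpm').2
    have hB := bucketLoop_items Bk cs (cap - 2) seed hseednd hWnd hWfresh
    rw [hA, hB, hflatten, hseedsize]
    congr 1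
    rw [← filter_eq_takeWhile mf ordered (sorted2_counts_desc items)]
    simp [List.map_take]
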